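-- pv_equiv track=rewrite | github.com/Christian15300/AALG_15766_S08 | recursividad.py | sumaresta
-- ===== SOURCE A (Python) =====
-- def sumaresta(lista, x=0):
--     if x == len(lista):
--         return 0
--
--     n = lista[x]
--
--     if (n // 2) * 2 == n:
--         return n + sumaresta(lista, x + 1)
--     else:
--         return -n + sumaresta(lista, x + 1)
-- ===== SOURCE B (Python) =====
-- def sumaresta(lista, x=0):
--     total = 0
--     for i in range(x, len(lista)):
--         n = lista[i]
--         if (n // 2) * 2 == n:
--             total += n
--         else:
--             total -= n
--     return total
-- ===== Notes on version B (the rewrite author's own statement) =====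
-- stated objective: idiomatic
-- what changed: Replaced the index recursion with a single iterative loop over range(x, len(lista)) accumulating a running total, keeping the exact (n//2)*2==n parity test.
-- crash fix: For x > len(lista) A raises IndexError while B's empty range makes it return 0; Pre_ excludes these (and x < -len, where both raise). — e.g. on sumaresta([1, 2], 3): A raises IndexError, B returns 0
import Mathlib
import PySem

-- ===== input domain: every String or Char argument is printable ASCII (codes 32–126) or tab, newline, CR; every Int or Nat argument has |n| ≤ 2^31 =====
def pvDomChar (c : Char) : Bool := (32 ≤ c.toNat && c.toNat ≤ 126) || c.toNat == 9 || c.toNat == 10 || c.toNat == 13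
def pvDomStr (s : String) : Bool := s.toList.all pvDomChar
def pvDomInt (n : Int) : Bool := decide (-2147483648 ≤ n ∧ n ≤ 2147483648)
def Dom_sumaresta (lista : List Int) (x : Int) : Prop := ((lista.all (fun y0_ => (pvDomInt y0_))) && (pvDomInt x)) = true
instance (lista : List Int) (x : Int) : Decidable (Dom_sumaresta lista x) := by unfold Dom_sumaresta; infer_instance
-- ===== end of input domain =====

-- B replaces A's index recursion by an iterative loop over range(x, len) with a running total (idiomatic, same cost).


-- ===== PORT A =====
-- fuel bounds the recursion depth (a totality artifact only; on Pre_ inputs the fuel suffices)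
def sumarestaGo (lista : List Int) (x : Int) : Nat → Int
  | 0 => 0
  | fuel + 1 =>
    if x = (lista.length : Int) then 0
    else
      let n := (PySem.List.pyGet? lista x).getD 0
      if PySem.Int.floordiv n 2 * 2 = n then n + sumarestaGo lista (x + 1) fuel
      else -n + sumarestaGo lista (x + 1) fuel

def sumaresta (lista : List Int) (x : Int) : Int :=
  sumarestaGo lista x ((lista.length - x).toNat + 1)

-- ===== PORT B =====
def sumaresta_alt (lista : List Int) (x : Int) : Int :=
  (PySem.List.pyRange x lista.length 1).foldl
    (fun total i =>
      let n := (PySem.List.pyGet? lista i).getD 0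
      if PySem.Int.floordiv n 2 * 2 = n then total + n else total - n) 0

-- ===== PRECONDITION & SPEC =====
-- Pre_ excludes exactly the inputs where the Python A raises IndexError: x > len (A raises, B returns 0: see Raises_) and x < -len (both raise).
def Pre_sumaresta (lista : List Int) (x : Int) : Prop :=
  -(lista.length : Int) ≤ x ∧ x ≤ (lista.length : Int)
instance (lista : List Int) (x : Int) : Decidable (Pre_sumaresta lista x) := by unfold Pre_sumaresta; infer_instance
def pvWitness_sumaresta : List Int × Int := ([3, 4, -5], 1)

-- For x > len(lista) A raises IndexError while B's empty range makes it return 0.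
def Raises_sumaresta (lista : List Int) (x : Int) : Prop := (lista.length : Int) < x
instance (lista : List Int) (x : Int) : Decidable (Raises_sumaresta lista x) := by unfold Raises_sumaresta; infer_instance
def pvRaiseWitness_sumaresta : List Int × Int := ([1, 2], 3)
def pvRaiseWitnessOut_sumaresta : Int := 0

def Spec_sumaresta (lista : List Int) (x : Int) (out : Int) : Prop := out = sumaresta_alt lista x
instance (lista : List Int) (x : Int) (out : Int) : Decidable (Spec_sumaresta lista x out) := by unfold Spec_sumaresta; infer_instance

-- ===== CLAIM (what is proved, stated in full; the proofs are below) =====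
def Claim_equal_sumaresta : Prop := ∀ (lista : List Int) (x : Int), Dom_sumaresta lista x → Pre_sumaresta lista x → Spec_sumaresta lista x (sumaresta lista x)
def Claim_raises_sumaresta : Prop := (∀ (lista : List Int) (x : Int), Dom_sumaresta lista x → Raises_sumaresta lista x → ¬ Pre_sumaresta lista x) ∧ (Dom_sumaresta (pvRaiseWitness_sumaresta.1) (pvRaiseWitness_sumaresta.2) ∧ Raises_sumaresta (pvRaiseWitness_sumaresta.1) (pvRaiseWitness_sumaresta.2) ∧ sumaresta_alt (pvRaiseWitness_sumaresta.1) (pvRaiseWitness_sumaresta.2) = pvRaiseWitnessOut_sumaresta)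

-- ===== LEMMAS AND PROOFS =====
def pvTerm (lista : List Int) (i : Int) : Int :=
  let n := (PySem.List.pyGet? lista i).getD 0
  if PySem.Int.floordiv n 2 * 2 = n then n else -n

lemma alt_eq_sum (lista : List Int) (x : Int) :
    sumaresta_alt lista x = ((PySem.List.pyRange x lista.length 1).map (pvTerm lista)).sum := by
  unfold sumaresta_alt
  have hstep : (fun (total i : Int) =>
      let n := (PySem.List.pyGet? lista i).getD 0
      if PySem.Int.floordiv n 2 * 2 = n then total + n else total - n)
      = fun (total i : Int) => total + pvTerm lista i := by
    funext t i
    simp only [pvTerm]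
    split <;> ring
  rw [hstep, PySem.List.foldl_add]
  ring

lemma sumaresta_go_eq (lista : List Int) :
    ∀ (fuel : Nat) (x : Int), -(lista.length : Int) ≤ x → x ≤ (lista.length : Int) →
      ((lista.length : Int) - x).toNat < fuel →
      sumarestaGo lista x fuel = sumaresta_alt lista x := by
  intro fuel
  induction fuel with
  | zero => intro x _ _ h; omega
  | succ f ih =>
    intro x hlo hhi hf
    by_cases hx : x = (lista.length : Int)
    · simp [sumarestaGo, hx, alt_eq_sum]
    · have hxlt : x < (lista.length : Int) := lt_of_le_of_ne hhi hx
      have hcons := PySem.List.pyRange_one_cons (a := x) (b := (lista.length : Int)) hxlt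
      rw [sumarestaGo]
      simp only [if_neg hx]
      rw [ih (x + 1) (by omega) (by omega) (by omega)]
      rw [alt_eq_sum, alt_eq_sum, hcons, List.map_cons, List.sum_cons]
      simp only [pvTerm]
      split <;> ring

-- ===== VERDICT (by name: the statement is the Claim_ definition above) =====
theorem sumaresta_spec : Claim_equal_sumaresta := by
  intro lista x _ hpre
  unfold Spec_sumaresta sumaresta
  exact sumaresta_go_eq lista _ x hpre.1 hpre.2 (by omega)

@[simp] theorem sumaresta_raises : Claim_raises_sumaresta := by
  unfold Claim_raises_sumaresta
  refine ⟨?_, by decide⟩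
  intro lista x _ hr hpre
  exact absurd hpre.2 (not_le.mpr hr)
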